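-- pv_equiv track=rewrite | github.com/PINTO0309/onnx2tf | onnx2tf/tflite_builder/pytorch_exporter/common.py | _product_expr
-- ===== SOURCE A (Python) =====
-- from typing import Any, Callable, Collection, Dict, List, Optional, Sequence, Set, Tuple, cast
--
-- def _product_expr(items: Sequence[str]) -> str:
--     item_list = [str(item) for item in list(items)]
--     if len(item_list) == 0:
--         return "1"
--     expr = item_list[0]
--     for item in item_list[1:]:
--         expr = f"({expr} * {item})"
--     return expr
-- ===== SOURCE B (Python) =====
-- def _product_expr(items):
--     item_list = [str(item) for item in list(items)]
--     if not item_list: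
--         return "1"
--     prefix, suffix = "", ""
--     for item in reversed(item_list[1:]):
--         prefix += "("
--         suffix = " * " + item + ")" + suffix
--     return prefix + item_list[0] + suffix
-- ===== Notes on version B (the rewrite author's own statement) =====
-- stated objective: alternative
-- what changed: B does not re-wrap a growing accumulator: it walks the tail right-to-left maintaining two separate accumulators (an open-paren prefix and a ' * item)' suffix built by prepending) and concatenates prefix + first + suffix once at the end.
import Mathlib
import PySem

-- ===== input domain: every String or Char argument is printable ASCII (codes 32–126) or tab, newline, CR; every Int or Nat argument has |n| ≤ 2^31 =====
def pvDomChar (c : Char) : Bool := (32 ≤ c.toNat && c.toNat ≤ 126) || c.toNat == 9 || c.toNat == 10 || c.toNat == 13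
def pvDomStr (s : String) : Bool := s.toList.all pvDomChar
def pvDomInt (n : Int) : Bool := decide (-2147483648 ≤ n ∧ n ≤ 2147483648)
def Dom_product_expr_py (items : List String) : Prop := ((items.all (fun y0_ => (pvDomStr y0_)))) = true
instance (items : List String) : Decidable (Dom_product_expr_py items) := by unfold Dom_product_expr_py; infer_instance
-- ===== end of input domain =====

-- B avoids re-wrapping a growing accumulator: it scans the tail right-to-left keeping a
-- separate open-paren prefix and a prepended " * item)" suffix, concatenated once at the
-- end; objective: alternative decomposition, same exact output.

-- ===== PORT A =====
-- str(item) is the identity on str inputs, so the list comprehension keeps the list as is.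
def product_expr_py (items : List String) : String :=
  match items with
  | [] => "1"
  | h :: t => t.foldl (fun expr item => "(" ++ expr ++ " * " ++ item ++ ")") h

-- ===== PORT B =====
-- one loop step: grow the prefix by '(' and prepend this item's " * item)" to the suffix
def pvStep (acc : String × String) (item : String) : String × String :=
  (acc.1.push '(', " * " ++ item ++ ")" ++ acc.2)

def product_expr_py_alt (items : List String) : String :=
  if items.isEmpty then "1" else
    let ps := (items.drop 1).reverse.foldl pvStep ("", "")
    ps.1 ++ items.headD "" ++ ps.2

-- ===== PRECONDITION & SPEC =====
def Spec_product_expr_py (items : List String) (out : String) : Prop := out = product_expr_py_alt items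
instance (items : List String) (out : String) : Decidable (Spec_product_expr_py items out) := by unfold Spec_product_expr_py; infer_instance

-- ===== CLAIM (what is proved, stated in full; the proofs are below) =====
def Claim_equal_product_expr_py : Prop := ∀ (items : List String), Dom_product_expr_py items → Spec_product_expr_py items (product_expr_py items)

-- ===== LEMMAS AND PROOFS =====
theorem replicate_paren_shift (n : Nat) (l : List Char) :
    List.replicate n '(' ++ '(' :: l = '(' :: (List.replicate n '(' ++ l) := by
  induction n with
  | zero => simp
  | succ n ih => simp [List.replicate_succ, ih]

theorem join_foldl (l : List String) (a : String) :
    List.foldl (fun r s => r ++ s) a l = a ++ String.join l := by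
  induction l generalizing a with
  | nil => simp [String.join]
  | cons x l ih =>
      have h2 : String.join (x :: l) = x ++ String.join l := by
        rw [String.join, List.foldl_cons, ih]; simp
      rw [List.foldl_cons, ih, h2, String.append_assoc]

-- characterization of A's left fold
theorem product_expr_fold_eq (t : List String) (e : String) :
    t.foldl (fun expr item => "(" ++ expr ++ " * " ++ item ++ ")") e
      = String.ofList (List.replicate t.length '(') ++ e
          ++ String.join (t.map (fun item => " * " ++ item ++ ")")) := by
  induction t generalizing e with
  | nil => simp [String.join]
  | cons x t ih =>
      have h2 : String.join ((" * " ++ x ++ ")") :: t.map (fun item => " * " ++ item ++ ")"))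
          = (" * " ++ x ++ ")") ++ String.join (t.map (fun item => " * " ++ item ++ ")")) := by
        rw [String.join, List.foldl_cons, join_foldl]; simp
      simp only [List.foldl_cons, List.map_cons, List.length_cons, ih, h2]
      apply String.toList_inj.mp
      simp [List.replicate_succ, List.append_assoc, replicate_paren_shift]

-- characterization of B's two-accumulator fold
theorem pvStep_fold_eq (l : List String) (p s : String) :
    l.foldl pvStep (p, s)
      = (p ++ String.ofList (List.replicate l.length '('),
         String.join (l.reverse.map (fun item => " * " ++ item ++ ")")) ++ s) := by
  induction l generalizing p s with
  | nil => simp [String.join]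
  | cons x l ih =>
      have hjoin : String.join ((l.reverse.map (fun item => " * " ++ item ++ ")"))
            ++ [" * " ++ x ++ ")"])
          = String.join (l.reverse.map (fun item => " * " ++ item ++ ")"))
            ++ (" * " ++ x ++ ")") := by
        rw [String.join, List.foldl_append, List.foldl_cons, List.foldl_nil, ← String.join]
      simp only [List.foldl_cons, pvStep, ih, List.reverse_cons, List.map_append,
        List.map_cons, List.map_nil, List.length_cons, hjoin, Prod.mk.injEq]
      constructor
      · apply String.toList_inj.mp
        simp [List.replicate_succ, String.toList_push]
      · simp [String.append_assoc]

-- ===== VERDICT (by name: the statement is the Claim_ definition above) =====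
theorem product_expr_py_spec : Claim_equal_product_expr_py := by
  intro items _
  unfold Spec_product_expr_py product_expr_py product_expr_py_alt
  cases items with
  | nil => rfl
  | cons h t =>
      simp only [List.isEmpty_cons, List.drop_succ_cons, List.drop_zero, List.headD_cons,
        Bool.false_eq_true, if_false, pvStep_fold_eq, List.reverse_reverse, List.length_reverse,
        product_expr_fold_eq]
      simp [String.append_assoc]
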